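-- pv_equiv track=rewrite | github.com/saiprasad-d/Python_practice | charging_phone.py | chargingphone
-- ===== SOURCE A (Python) =====
-- def chargingphone(inicharge, finalcharge):
--     current = inicharge
--     time_taken = 0
--     while current <= finalcharge:
--         if 0 <= current <= 10:
--             current = current + 10
--             time_taken +=1
--         elif 11 <= current <= 230:
--             current = current + 5
--             time_taken +=1
--         elif 231 <= current <= 559:
--             current = current + 8
--             time_taken +=1
--         elif 560 <= current <= 1009:
--             current = current + 2
--             time_taken +=1
--         elif 1010 <= current <= 5000:
--             current = current + 7
--             time_taken +=1
--         elif 5001 <= current <= 10000: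
--             current = current + 8
--             time_taken +=1
--         elif 10001 <= current <= 10**9:
--             current = current + 3
--             time_taken +=1
--     return time_taken
-- ===== SOURCE B (Python) =====
-- _SEGS = [(0, 10, 10), (11, 230, 5), (231, 559, 8), (560, 1009, 2),
--          (1010, 5000, 7), (5001, 10000, 8), (10001, 10**9, 3)]
--
-- def _run(segs, finalcharge, current):
--     if not segs:
--         return 0
--     (lo, hi, s) = segs[0]
--     rest = segs[1:]
--     if lo <= current <= hi and current <= finalcharge:
--         m = min(hi, finalcharge)
--         k = (m - current) // s + 1
--         return k + _run(rest, finalcharge, current + s * k)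
--     return _run(rest, finalcharge, current)
--
-- def chargingphone(inicharge, finalcharge):
--     return _run(_SEGS, finalcharge, inicharge)
-- ===== Notes on version B (the rewrite author's own statement) =====
-- stated objective: faster
-- what changed: Replaces the step-by-step charging loop (one iteration per time unit) by a closed-form pass over the seven fixed charge-rate segments, computing each segment's step count with one ceiling division.
-- outside the precondition, e.g. on chargingphone(999999998, 1000000001): A does not finish within the time limit, B returns 1; on chargingphone(999999999, 1000000001): A returns 1, B returns 1
import Mathlib
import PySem

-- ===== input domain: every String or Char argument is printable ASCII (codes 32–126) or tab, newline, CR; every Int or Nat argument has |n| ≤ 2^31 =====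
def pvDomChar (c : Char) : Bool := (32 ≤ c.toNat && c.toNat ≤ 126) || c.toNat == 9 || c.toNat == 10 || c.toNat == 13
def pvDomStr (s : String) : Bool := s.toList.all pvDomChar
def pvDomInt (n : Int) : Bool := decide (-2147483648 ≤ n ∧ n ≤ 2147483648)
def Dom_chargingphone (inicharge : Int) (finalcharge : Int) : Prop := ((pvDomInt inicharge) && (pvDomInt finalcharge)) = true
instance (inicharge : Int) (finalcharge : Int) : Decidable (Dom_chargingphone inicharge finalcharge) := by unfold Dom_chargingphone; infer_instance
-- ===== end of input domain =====

-- B replaces A's one-iteration-per-time-step while loop by a closed-form pass over the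
-- seven fixed charge-rate segments (one ceiling division per segment): asymptotically faster.

-- ===== PORT A =====
-- literal port of A's while loop; 1000000000 is Python's 10**9.
-- The Nat argument is fuel making the recursion structural (a totality guard only: chargingphone
-- below passes fuel that is proved sufficient on Pre_, see loop_eq_alt).
-- In the final inner 'else' (current ≤ finalcharge but in no charge range) the Python
-- loop runs forever; such inputs are excluded by Pre_ below, the port returns time_taken there.
def chargingphoneLoop : Nat → Int → Int → Int → Int
  | 0, _, _, time_taken => time_taken
  | fuel + 1, finalcharge, current, time_taken =>
    if current ≤ finalcharge then
      if 0 ≤ current ∧ current ≤ 10 then chargingphoneLoop fuel finalcharge (current + 10) (time_taken + 1)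
      else if 11 ≤ current ∧ current ≤ 230 then chargingphoneLoop fuel finalcharge (current + 5) (time_taken + 1)
      else if 231 ≤ current ∧ current ≤ 559 then chargingphoneLoop fuel finalcharge (current + 8) (time_taken + 1)
      else if 560 ≤ current ∧ current ≤ 1009 then chargingphoneLoop fuel finalcharge (current + 2) (time_taken + 1)
      else if 1010 ≤ current ∧ current ≤ 5000 then chargingphoneLoop fuel finalcharge (current + 7) (time_taken + 1)
      else if 5001 ≤ current ∧ current ≤ 10000 then chargingphoneLoop fuel finalcharge (current + 8) (time_taken + 1)
      else if 10001 ≤ current ∧ current ≤ 1000000000 then chargingphoneLoop fuel finalcharge (current + 3) (time_taken + 1)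
      else time_taken
    else time_taken

def chargingphone (inicharge : Int) (finalcharge : Int) : Int :=
  chargingphoneLoop ((finalcharge + 1 - inicharge).toNat + 1) finalcharge inicharge 0

-- ===== PORT B =====
-- the fixed charge-rate table _SEGS of Source B
def pvSegs : List (Int × Int × Int) :=
  [(0, 10, 10), (11, 230, 5), (231, 559, 8), (560, 1009, 2),
   (1010, 5000, 7), (5001, 10000, 8), (10001, 1000000000, 3)]

-- literal port of Source B's recursive helper _run
def runSegs : List (Int × Int × Int) → Int → Int → Int
  | [], _, _ => 0
  | (lo, hi, s) :: rest, finalcharge, current =>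
    if lo ≤ current ∧ current ≤ hi ∧ current ≤ finalcharge then
      let m := min hi finalcharge
      let k := PySem.Int.floordiv (m - current) s + 1
      k + runSegs rest finalcharge (current + s * k)
    else runSegs rest finalcharge current

def chargingphone_alt (inicharge : Int) (finalcharge : Int) : Int :=
  runSegs pvSegs finalcharge inicharge

-- ===== PRECONDITION & SPEC =====
-- Pre_ excludes the inputs with inicharge ≤ finalcharge on which A's loop can reach a
-- charge outside every charge range while still ≤ finalcharge (inicharge < 0, or
-- finalcharge > 10**9): there A DIVERGES, except for finalcharge ∈ {10**9+1, 10**9+2}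
-- with a matching step residue, where both programs return the same value.
def Pre_chargingphone (inicharge : Int) (finalcharge : Int) : Prop :=
  finalcharge < inicharge ∨ (0 ≤ inicharge ∧ finalcharge ≤ 1000000000)
instance (inicharge : Int) (finalcharge : Int) : Decidable (Pre_chargingphone inicharge finalcharge) := by
  unfold Pre_chargingphone; infer_instance

def pvWitness_chargingphone : Int × Int := (5, 27)

def Spec_chargingphone (inicharge : Int) (finalcharge : Int) (out : Int) : Prop := out = chargingphone_alt inicharge finalcharge
instance (inicharge : Int) (finalcharge : Int) (out : Int) : Decidable (Spec_chargingphone inicharge finalcharge out) := by unfold Spec_chargingphone; infer_instance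

-- ===== CLAIM (what is proved, stated in full; the proofs are below) =====
def Claim_equal_chargingphone : Prop := ∀ (inicharge : Int) (finalcharge : Int), Dom_chargingphone inicharge finalcharge → Pre_chargingphone inicharge finalcharge → Spec_chargingphone inicharge finalcharge (chargingphone inicharge finalcharge)

-- ===== LEMMAS AND PROOFS =====

-- the increment A's branch table chooses at charge c (0 if no range matches)
def pvStep (c : Int) : Int :=
  if 0 ≤ c ∧ c ≤ 10 then 10
  else if 11 ≤ c ∧ c ≤ 230 then 5
  else if 231 ≤ c ∧ c ≤ 559 then 8
  else if 560 ≤ c ∧ c ≤ 1009 then 2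
  else if 1010 ≤ c ∧ c ≤ 5000 then 7
  else if 5001 ≤ c ∧ c ≤ 10000 then 8
  else if 10001 ≤ c ∧ c ≤ 1000000000 then 3
  else 0

lemma pvStep_ge_two {c : Int} (h0 : 0 ≤ c) (h9 : c ≤ 1000000000) : 2 ≤ pvStep c := by
  unfold pvStep; split_ifs <;> omega

lemma loop_exit (n : Nat) (F c t : Int) (h : F < c) : chargingphoneLoop n F c t = t := by
  cases n with
  | zero => rfl
  | succ n => rw [chargingphoneLoop, if_neg (by omega)]

lemma loop_step (n : Nat) (F c t : Int) (hcF : c ≤ F) (h0 : 0 ≤ c) (h9 : c ≤ 1000000000) :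
    chargingphoneLoop (n + 1) F c t = chargingphoneLoop n F (c + pvStep c) (t + 1) := by
  conv_lhs => rw [chargingphoneLoop]
  simp only [pvStep]
  split_ifs <;> first | rfl | omega

-- one unfolding of runSegs on a cons cell
lemma run_cons (lo hi s : Int) (rest : List (Int × Int × Int)) (F c : Int) :
    runSegs ((lo, hi, s) :: rest) F c =
      if lo ≤ c ∧ c ≤ hi ∧ c ≤ F then
        (PySem.Int.floordiv (min hi F - c) s + 1) +
          runSegs rest F (c + s * (PySem.Int.floordiv (min hi F - c) s + 1))
      else runSegs rest F c := rfl

lemma runSegs_gt : ∀ (segs : List (Int × Int × Int)) (F c : Int), F < c → runSegs segs F c = 0 := by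
  intro segs
  induction segs with
  | nil => intro F c _; rfl
  | cons seg rest ih =>
    intro F c h
    obtain ⟨lo, hi, s⟩ := seg
    rw [run_cons, if_neg (by omega)]
    exact ih F c h

-- B's pass, restricted to the segment containing c, absorbs exactly one charging step:
-- pre = segments strictly below c (never firing again), (lo,hi,s) = c's segment.
lemma seg_step (pre : List (Int × Int × Int)) (lo hi s : Int) (rest : List (Int × Int × Int))
    (F c : Int) (hs : 0 < s) (hlo : lo ≤ c) (hhi : c ≤ hi) (hcF : c ≤ F)
    (hpre : ∀ x, lo ≤ x → runSegs (pre ++ (lo, hi, s) :: rest) F x = runSegs ((lo, hi, s) :: rest) F x)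
    (hrest : ∀ x, hi < x → runSegs (pre ++ (lo, hi, s) :: rest) F x = runSegs rest F x) :
    runSegs (pre ++ (lo, hi, s) :: rest) F c = 1 + runSegs (pre ++ (lo, hi, s) :: rest) F (c + s) := by
  have hm1 : min hi F ≤ hi := min_le_left _ _
  have hm2 : min hi F ≤ F := min_le_right _ _
  have hmc : c ≤ min hi F := le_min hhi hcF
  rw [hpre c hlo, run_cons, if_pos ⟨hlo, hhi, hcF⟩,
      PySem.Int.floordiv_eq_ediv_of_pos hs]
  by_cases h1 : F < c + s
  · have hq : (min hi F - c) / s = 0 := Int.ediv_eq_zero_of_lt (by omega) (by omega)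
    rw [hq, show c + s * (0 + 1) = c + s by ring,
        runSegs_gt rest F (c + s) (by omega),
        runSegs_gt _ F (c + s) (by omega)]
    norm_num
  · by_cases h2 : c + s ≤ hi
    · have h2' : c + s ≤ min hi F := le_min h2 (by omega)
      rw [hpre (c + s) (by omega), run_cons, if_pos ⟨by omega, h2, by omega⟩,
          PySem.Int.floordiv_eq_ediv_of_pos hs]
      have hq : (min hi F - (c + s)) / s = (min hi F - c) / s - 1 := by
        have h := Int.add_mul_ediv_right (min hi F - c) (-1) (by omega : s ≠ 0)
        rw [show min hi F - (c + s) = min hi F - c + -1 * s by ring, h]; ring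
      rw [hq]
      set q := (min hi F - c) / s with hqdef
      rw [show c + s + s * (q - 1 + 1) = c + s * (q + 1) by ring]
      ring
    · have hminhi : min hi F = hi := min_eq_left (by omega)
      have hq : (min hi F - c) / s = 0 := Int.ediv_eq_zero_of_lt (by omega) (by omega)
      rw [hq, show c + s * (0 + 1) = c + s by ring, hrest (c + s) (by omega)]
      ring

-- B's whole pass absorbs one charging step of A, for any in-range charge c
lemma alt_step (F c : Int) (h0 : 0 ≤ c) (hcF : c ≤ F) (h9 : F ≤ 1000000000) :
    runSegs pvSegs F c = 1 + runSegs pvSegs F (c + pvStep c) := by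
  by_cases hc1 : c ≤ 10
  · have hstep : pvStep c = 10 := by unfold pvStep; rw [if_pos (by omega)]
    rw [hstep]
    exact seg_step [] 0 10 10 [(11, 230, 5), (231, 559, 8), (560, 1009, 2), (1010, 5000, 7), (5001, 10000, 8), (10001, 1000000000, 3)] F c (by norm_num) (by omega) hc1 hcF
      (fun x hx => rfl)
      (by intro x hx; simp only [List.nil_append]; rw [run_cons, if_neg (by omega)])
  by_cases hc2 : c ≤ 230
  · have hstep : pvStep c = 5 := by unfold pvStep; rw [if_neg (by omega)]; rw [if_pos (by omega)]
    rw [hstep]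
    exact seg_step [(0, 10, 10)] 11 230 5 [(231, 559, 8), (560, 1009, 2), (1010, 5000, 7), (5001, 10000, 8), (10001, 1000000000, 3)] F c (by norm_num) (by omega) hc2 hcF
      (by intro x hx; simp only [List.cons_append, List.nil_append]; rw [run_cons, if_neg (by omega)])
      (by intro x hx; simp only [List.cons_append, List.nil_append]; rw [run_cons, if_neg (by omega)]; rw [run_cons, if_neg (by omega)])
  by_cases hc3 : c ≤ 559
  · have hstep : pvStep c = 8 := by unfold pvStep; rw [if_neg (by omega)]; rw [if_neg (by omega)]; rw [if_pos (by omega)]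
    rw [hstep]
    exact seg_step [(0, 10, 10), (11, 230, 5)] 231 559 8 [(560, 1009, 2), (1010, 5000, 7), (5001, 10000, 8), (10001, 1000000000, 3)] F c (by norm_num) (by omega) hc3 hcF
      (by intro x hx; simp only [List.cons_append, List.nil_append]; rw [run_cons, if_neg (by omega)]; rw [run_cons, if_neg (by omega)])
      (by intro x hx; simp only [List.cons_append, List.nil_append]; rw [run_cons, if_neg (by omega)]; rw [run_cons, if_neg (by omega)]; rw [run_cons, if_neg (by omega)])
  by_cases hc4 : c ≤ 1009
  · have hstep : pvStep c = 2 := by unfold pvStep; rw [if_neg (by omega)]; rw [if_neg (by omega)]; rw [if_neg (by omega)]; rw [if_pos (by omega)]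
    rw [hstep]
    exact seg_step [(0, 10, 10), (11, 230, 5), (231, 559, 8)] 560 1009 2 [(1010, 5000, 7), (5001, 10000, 8), (10001, 1000000000, 3)] F c (by norm_num) (by omega) hc4 hcF
      (by intro x hx; simp only [List.cons_append, List.nil_append]; rw [run_cons, if_neg (by omega)]; rw [run_cons, if_neg (by omega)]; rw [run_cons, if_neg (by omega)])
      (by intro x hx; simp only [List.cons_append, List.nil_append]; rw [run_cons, if_neg (by omega)]; rw [run_cons, if_neg (by omega)]; rw [run_cons, if_neg (by omega)]; rw [run_cons, if_neg (by omega)])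
  by_cases hc5 : c ≤ 5000
  · have hstep : pvStep c = 7 := by unfold pvStep; rw [if_neg (by omega)]; rw [if_neg (by omega)]; rw [if_neg (by omega)]; rw [if_neg (by omega)]; rw [if_pos (by omega)]
    rw [hstep]
    exact seg_step [(0, 10, 10), (11, 230, 5), (231, 559, 8), (560, 1009, 2)] 1010 5000 7 [(5001, 10000, 8), (10001, 1000000000, 3)] F c (by norm_num) (by omega) hc5 hcF
      (by intro x hx; simp only [List.cons_append, List.nil_append]; rw [run_cons, if_neg (by omega)]; rw [run_cons, if_neg (by omega)]; rw [run_cons, if_neg (by omega)]; rw [run_cons, if_neg (by omega)])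
      (by intro x hx; simp only [List.cons_append, List.nil_append]; rw [run_cons, if_neg (by omega)]; rw [run_cons, if_neg (by omega)]; rw [run_cons, if_neg (by omega)]; rw [run_cons, if_neg (by omega)]; rw [run_cons, if_neg (by omega)])
  by_cases hc6 : c ≤ 10000
  · have hstep : pvStep c = 8 := by unfold pvStep; rw [if_neg (by omega)]; rw [if_neg (by omega)]; rw [if_neg (by omega)]; rw [if_neg (by omega)]; rw [if_neg (by omega)]; rw [if_pos (by omega)]
    rw [hstep]
    exact seg_step [(0, 10, 10), (11, 230, 5), (231, 559, 8), (560, 1009, 2), (1010, 5000, 7)] 5001 10000 8 [(10001, 1000000000, 3)] F c (by norm_num) (by omega) hc6 hcF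
      (by intro x hx; simp only [List.cons_append, List.nil_append]; rw [run_cons, if_neg (by omega)]; rw [run_cons, if_neg (by omega)]; rw [run_cons, if_neg (by omega)]; rw [run_cons, if_neg (by omega)]; rw [run_cons, if_neg (by omega)])
      (by intro x hx; simp only [List.cons_append, List.nil_append]; rw [run_cons, if_neg (by omega)]; rw [run_cons, if_neg (by omega)]; rw [run_cons, if_neg (by omega)]; rw [run_cons, if_neg (by omega)]; rw [run_cons, if_neg (by omega)]; rw [run_cons, if_neg (by omega)])
  by_cases hc7 : c ≤ 1000000000
  · have hstep : pvStep c = 3 := by unfold pvStep; rw [if_neg (by omega)]; rw [if_neg (by omega)]; rw [if_neg (by omega)]; rw [if_neg (by omega)]; rw [if_neg (by omega)]; rw [if_neg (by omega)]; rw [if_pos (by omega)]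
    rw [hstep]
    exact seg_step [(0, 10, 10), (11, 230, 5), (231, 559, 8), (560, 1009, 2), (1010, 5000, 7), (5001, 10000, 8)] 10001 1000000000 3 [] F c (by norm_num) (by omega) hc7 hcF
      (by intro x hx; simp only [List.cons_append, List.nil_append]; rw [run_cons, if_neg (by omega)]; rw [run_cons, if_neg (by omega)]; rw [run_cons, if_neg (by omega)]; rw [run_cons, if_neg (by omega)]; rw [run_cons, if_neg (by omega)]; rw [run_cons, if_neg (by omega)])
      (by intro x hx; simp only [List.cons_append, List.nil_append]; rw [run_cons, if_neg (by omega)]; rw [run_cons, if_neg (by omega)]; rw [run_cons, if_neg (by omega)]; rw [run_cons, if_neg (by omega)]; rw [run_cons, if_neg (by omega)]; rw [run_cons, if_neg (by omega)]; rw [run_cons, if_neg (by omega)])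
  omega

lemma loop_eq_alt (F : Int) : ∀ (n : Nat) (c t : Int), (F + 1 - c).toNat < n → 0 ≤ c → F ≤ 1000000000 →
    chargingphoneLoop n F c t = t + runSegs pvSegs F c := by
  intro n
  induction n with
  | zero => intro c t hn _ _; exact absurd hn (Nat.not_lt_zero _)
  | succ n ih =>
    intro c t hn h0 h9
    by_cases hcF : c ≤ F
    · have hs := pvStep_ge_two h0 (by omega)
      rw [loop_step n F c t hcF h0 (by omega),
          ih (c + pvStep c) (t + 1) (by omega) (by omega) h9,
          alt_step F c h0 hcF h9]
      ring
    · rw [loop_exit (n + 1) F c t (by omega), runSegs_gt pvSegs F c (by omega)]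
      omega

-- ===== VERDICT (by name: the statement is the Claim_ definition above) =====
theorem chargingphone_spec : Claim_equal_chargingphone := by
  intro i F _ hpre
  unfold Spec_chargingphone chargingphone chargingphone_alt
  rcases hpre with h | ⟨h0, h9⟩
  · rw [loop_exit _ F i 0 h, runSegs_gt pvSegs F i h]
  · rw [loop_eq_alt F ((F + 1 - i).toNat + 1) i 0 (Nat.lt_succ_self _) h0 h9]
    omega
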